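-- pv_equiv track=rewrite | github.com/carodewig/advent-of-code | 2020/day_06.py | parse_any_member
-- ===== SOURCE A (Python) =====
-- def parse_any_member(answers):
--     total_yeses = 0
--     group = []
--
--     for line in answers.split("\n"):
--         if line == "":
--             total_yeses += len(set(group))
--             group = []
--         else:
--             group += list(line)
--
--     total_yeses += len(set(group))
--     return total_yeses
-- ===== SOURCE B (Python) =====
-- def parse_any_member(answers):
--     return sum(len(set(group) - {"\n"}) for group in answers.split("\n\n"))
-- ===== Notes on version B (the rewrite author's own statement) =====
-- stated objective: simpler
-- what changed: Replaces the stateful line-by-line loop with a flush-on-blank accumulator by a one-liner that splits the input into whole groups at blank-line boundaries and sums the count of distinct non-newline characters per group chunk.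
import Mathlib
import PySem

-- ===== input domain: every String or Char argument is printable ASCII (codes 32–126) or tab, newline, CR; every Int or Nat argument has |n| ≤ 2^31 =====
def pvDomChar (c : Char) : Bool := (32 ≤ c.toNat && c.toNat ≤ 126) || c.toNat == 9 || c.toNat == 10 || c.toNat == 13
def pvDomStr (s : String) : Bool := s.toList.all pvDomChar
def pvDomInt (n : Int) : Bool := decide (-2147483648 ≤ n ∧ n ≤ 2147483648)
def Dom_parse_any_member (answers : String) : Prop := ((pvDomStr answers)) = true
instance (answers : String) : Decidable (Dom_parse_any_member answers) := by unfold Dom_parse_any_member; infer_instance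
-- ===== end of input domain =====

-- B replaces A's stateful line-by-line loop (flush the running group at blank lines) by
-- splitting the input on "\n\n" group boundaries and summing the distinct non-newline
-- characters of each chunk (objective: simpler).

-- ===== PORT A =====
def parse_any_member (answers : String) : Int :=
  let r := (PySem.Chars.splitOn answers.toList ['\n']).foldl
    (fun (st : Int × List Char) line =>
      if line = ([] : List Char) then (st.1 + PySem.Set.len (PySem.Set.ofList st.2), ([] : List Char))
      else (st.1, st.2 ++ line))
    (0, ([] : List Char))
  r.1 + PySem.Set.len (PySem.Set.ofList r.2)


-- ===== PORT B =====
def parse_any_member_alt (answers : String) : Int :=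
  ((PySem.Chars.splitOn answers.toList ['\n', '\n']).map
    (fun group => PySem.Set.len (PySem.Set.diff (PySem.Set.ofList group) (PySem.Set.ofList ['\n'])))).sum


-- ===== PRECONDITION & SPEC =====
def Spec_parse_any_member (answers : String) (out : Int) : Prop := out = parse_any_member_alt answers
instance (answers : String) (out : Int) : Decidable (Spec_parse_any_member answers out) := by unfold Spec_parse_any_member; infer_instance

-- ===== CLAIM (what is proved, stated in full; the proofs are below) =====
def Claim_equal_parse_any_member : Prop := ∀ (answers : String), Dom_parse_any_member answers → Spec_parse_any_member answers (parse_any_member answers)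

-- ===== LEMMAS AND PROOFS =====

lemma pvGo_nil (sep : List Char) (f : Nat) (cur : List Char) (acc : List (List Char)) :
    PySem.Chars.splitOn.go sep (f + 1) [] cur acc = (cur.reverse :: acc).reverse := by
  rw [PySem.Chars.splitOn.go]; omega
lemma pvGo_cons (sep : List Char) (f : Nat) (c : Char) (rest cur : List Char) (acc : List (List Char)) :
    PySem.Chars.splitOn.go sep (f + 1) (c :: rest) cur acc =
      if sep.isPrefixOf (c :: rest) then
        PySem.Chars.splitOn.go sep f (List.drop sep.length (c :: rest)) [] (cur.reverse :: acc)
      else PySem.Chars.splitOn.go sep f rest (c :: cur) acc := by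
  rw [PySem.Chars.splitOn.go]

lemma pvGo_fuel (sep : List Char) (hsep : sep ≠ []) :
    ∀ (f f' : Nat) (l cur : List Char) (acc : List (List Char)),
      l.length ≤ f → l.length ≤ f' →
      PySem.Chars.splitOn.go sep f l cur acc = PySem.Chars.splitOn.go sep f' l cur acc := by
  intro f
  induction f with
  | zero =>
    intro f' l cur acc h h'
    cases l with
    | nil =>
      cases f' with
      | zero => rfl
      | succ f' => rw [pvGo_nil, PySem.Chars.splitOn.go]; simp
    | cons c rest => simp at h
  | succ f ih =>
    intro f' l cur acc h h'
    cases l with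
    | nil =>
      cases f' with
      | zero => rw [pvGo_nil, PySem.Chars.splitOn.go]; simp
      | succ f' => rw [pvGo_nil, pvGo_nil]
    | cons c rest =>
      cases f' with
      | zero => simp at h'
      | succ f' =>
        rw [pvGo_cons, pvGo_cons]
        by_cases hp : sep.isPrefixOf (c :: rest)
        · simp only [hp, if_true]
          apply ih
          · have h1 : 0 < sep.length := List.length_pos_iff.mpr hsep
            simp only [List.length_drop, List.length_cons] at *
            omega
          · have h1 : 0 < sep.length := List.length_pos_iff.mpr hsep
            simp only [List.length_drop, List.length_cons] at *
            omega
        · simp only [hp, Bool.false_eq_true, if_false]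
          apply ih <;> simp_all

def pvPrep (x : List Char) : List (List Char) → List (List Char)
  | [] => [x]
  | h :: t => (x ++ h) :: t

lemma pvPrep_prep (a b : List Char) (X : List (List Char)) :
    pvPrep a (pvPrep b X) = pvPrep (a ++ b) X := by
  cases X <;> simp [pvPrep]

lemma pvGo_acc (sep : List Char) :
    ∀ (f : Nat) (l cur : List Char) (acc : List (List Char)),
      PySem.Chars.splitOn.go sep f l cur acc = acc.reverse ++ PySem.Chars.splitOn.go sep f l cur [] := by
  intro f
  induction f with
  | zero =>
    intro l cur acc
    rw [PySem.Chars.splitOn.go, PySem.Chars.splitOn.go]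
    cases l <;> simp
  | succ f ih =>
    intro l cur acc
    cases l with
    | nil => rw [pvGo_nil, pvGo_nil]; simp
    | cons c rest =>
      rw [pvGo_cons, pvGo_cons]
      by_cases hp : sep.isPrefixOf (c :: rest)
      · simp only [hp, if_true]
        rw [ih _ _ (cur.reverse :: acc), ih _ _ ([cur.reverse])]
        simp
      · simp only [hp, Bool.false_eq_true, if_false]
        exact ih _ _ _

lemma pvGo_cur (sep : List Char) :
    ∀ (f : Nat) (l cur : List Char),
      PySem.Chars.splitOn.go sep f l cur [] = pvPrep cur.reverse (PySem.Chars.splitOn.go sep f l [] []) := by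
  intro f
  induction f with
  | zero =>
    intro l cur
    rw [PySem.Chars.splitOn.go, PySem.Chars.splitOn.go]
    cases l <;> simp [pvPrep]
  | succ f ih =>
    intro l cur
    cases l with
    | nil => rw [pvGo_nil, pvGo_nil]; simp [pvPrep]
    | cons c rest =>
      rw [pvGo_cons, pvGo_cons]
      by_cases hp : sep.isPrefixOf (c :: rest)
      · simp only [hp, if_true]
        rw [pvGo_acc sep f _ [] [cur.reverse], pvGo_acc sep f _ [] [List.reverse []]]
        cases PySem.Chars.splitOn.go sep f (List.drop sep.length (c :: rest)) [] [] <;> simp [pvPrep]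
      · simp only [hp, Bool.false_eq_true, if_false]
        rw [ih rest (c :: cur), ih rest [c]]
        rw [pvPrep_prep]
        simp

lemma pvSplitOn_pos (sep : List Char) (hsep : sep ≠ []) (c : Char) (rest : List Char)
    (h : sep.isPrefixOf (c :: rest)) :
    PySem.Chars.splitOn (c :: rest) sep = [] :: PySem.Chars.splitOn (List.drop sep.length (c :: rest)) sep := by
  show PySem.Chars.splitOn.go sep ((c :: rest).length + 1) (c :: rest) [] [] = _
  rw [pvGo_cons, if_pos h, pvGo_acc]
  have h1 : 0 < sep.length := List.length_pos_iff.mpr hsep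
  rw [pvGo_fuel sep hsep ((c :: rest).length) ((List.drop sep.length (c :: rest)).length + 1) _ _ _
      (by simp) (by omega)]
  simp [PySem.Chars.splitOn]

lemma pvSplitOn_neg (sep : List Char) (hsep : sep ≠ []) (c : Char) (rest : List Char)
    (h : ¬ sep.isPrefixOf (c :: rest)) :
    PySem.Chars.splitOn (c :: rest) sep = pvPrep [c] (PySem.Chars.splitOn rest sep) := by
  show PySem.Chars.splitOn.go sep ((c :: rest).length + 1) (c :: rest) [] [] = _
  rw [pvGo_cons, if_neg (by simp [h]), pvGo_cur]
  rw [pvGo_fuel sep hsep ((c :: rest).length) (rest.length + 1) _ _ _ (by simp) (by omega)]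
  simp [PySem.Chars.splitOn]

lemma pvS1_nl (r : List Char) :
    PySem.Chars.splitOn ('\n' :: r) ['\n'] = [] :: PySem.Chars.splitOn r ['\n'] := by
  have := pvSplitOn_pos ['\n'] (by simp) '\n' r (by simp [List.isPrefixOf])
  simpa using this

lemma pvS1_char (c : Char) (hc : c ≠ '\n') (r : List Char) :
    PySem.Chars.splitOn (c :: r) ['\n'] = pvPrep [c] (PySem.Chars.splitOn r ['\n']) := by
  exact pvSplitOn_neg ['\n'] (by simp) c r (by simp [List.isPrefixOf]; exact fun h => hc h.symm)

lemma pvS2_nn (r : List Char) :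
    PySem.Chars.splitOn ('\n' :: '\n' :: r) ['\n', '\n'] = [] :: PySem.Chars.splitOn r ['\n', '\n'] := by
  have := pvSplitOn_pos ['\n', '\n'] (by simp) '\n' ('\n' :: r) (by simp [List.isPrefixOf])
  simpa using this

lemma pvS2_other (c : Char) (rest : List Char) (h : ¬ (c = '\n' ∧ rest.head? = some '\n')) :
    PySem.Chars.splitOn (c :: rest) ['\n', '\n'] = pvPrep [c] (PySem.Chars.splitOn rest ['\n', '\n']) := by
  apply pvSplitOn_neg ['\n', '\n'] (by simp) c rest
  intro hp
  cases rest with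
  | nil => simp [List.isPrefixOf] at hp
  | cons d r => simp [List.isPrefixOf] at hp; exact h ⟨hp.1.symm, by simp [hp.2.symm]⟩

lemma pvSplitOn_nil (sep : List Char) : PySem.Chars.splitOn [] sep = [[]] := rfl

lemma pvJoin_cons (sep : List Char) (x : List Char) (y : List Char) (t : List (List Char)) :
    PySem.Chars.join sep (x :: y :: t) = x ++ sep ++ PySem.Chars.join sep (y :: t) := by
  simp [PySem.Chars.join, List.intercalate]

lemma pvJoin_single (sep : List Char) (x : List Char) : PySem.Chars.join sep [x] = x := by
  simp [PySem.Chars.join, List.intercalate]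

lemma pvS1_struct (cs : List Char) :
    PySem.Chars.splitOn cs ['\n'] ≠ [] ∧ (∀ l ∈ PySem.Chars.splitOn cs ['\n'], '\n' ∉ l) ∧
      PySem.Chars.join ['\n'] (PySem.Chars.splitOn cs ['\n']) = cs := by
  induction cs with
  | nil => refine ⟨by simp [PySem.Chars.splitOn, PySem.Chars.splitOn.go], ?_, ?_⟩ <;>
      simp [pvSplitOn_nil, pvJoin_single]
  | cons c rest ih =>
    by_cases hc : c = '\n'
    · subst hc
      rw [pvS1_nl]
      refine ⟨by simp, ?_, ?_⟩
      · intro l hl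
        rcases List.mem_cons.mp hl with h | h
        · simp [h]
        · exact ih.2.1 l h
      · rcases List.exists_cons_of_ne_nil ih.1 with ⟨y, t, hy⟩
        rw [hy, pvJoin_cons]
        have := ih.2.2
        rw [hy] at this
        simp [this]
    · rw [pvS1_char c hc]
      rcases List.exists_cons_of_ne_nil ih.1 with ⟨y, t, hy⟩
      rw [hy, pvPrep]
      refine ⟨by simp, ?_, ?_⟩
      · intro l hl
        rcases List.mem_cons.mp hl with h | h
        · subst h
          intro hm
          rcases List.mem_cons.mp hm with h | h
          · exact hc h.symm
          · exact ih.2.1 y (by simp [hy]) h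
        · exact ih.2.1 l (by simp [hy, h])
      · have := ih.2.2
        rw [hy] at this
        cases t with
        | nil => rw [pvJoin_single] at this ⊢; simp [this]
        | cons z t' =>
          rw [pvJoin_cons] at this ⊢
          simp at this ⊢
          simp [this]

lemma pvC1 (l : List Char) (hl : '\n' ∉ l) : PySem.Chars.splitOn l ['\n', '\n'] = [l] := by
  induction l with
  | nil => rfl
  | cons c r ih =>
    have hc : c ≠ '\n' := fun h => hl (by simp [h])
    rw [pvS2_other c r (by intro h; exact hc h.1)]
    rw [ih (fun h => hl (by simp [h]))]
    simp [pvPrep]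

lemma pvC2 (l : List Char) (hl : '\n' ∉ l) (r : List Char) :
    PySem.Chars.splitOn (l ++ '\n' :: '\n' :: r) ['\n', '\n'] = l :: PySem.Chars.splitOn r ['\n', '\n'] := by
  induction l with
  | nil => simpa using pvS2_nn r
  | cons c l' ih =>
    have hc : c ≠ '\n' := fun h => hl (by simp [h])
    rw [List.cons_append, pvS2_other c _ (by intro h; exact hc h.1)]
    rw [ih (fun h => hl (by simp [h]))]
    simp [pvPrep]

lemma pvC3 (l : List Char) (hl : '\n' ∉ l) :
    PySem.Chars.splitOn (l ++ ['\n']) ['\n', '\n'] = [l ++ ['\n']] := by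
  induction l with
  | nil =>
    rw [List.nil_append, pvS2_other '\n' [] (by simp)]
    simp [pvSplitOn_nil, pvPrep]
  | cons c l' ih =>
    have hc : c ≠ '\n' := fun h => hl (by simp [h])
    rw [List.cons_append, pvS2_other c _ (by intro h; exact hc h.1)]
    rw [ih (fun h => hl (by simp [h]))]
    simp [pvPrep]

lemma pvC4 (l : List Char) (hl : '\n' ∉ l) (cs' : List Char) (h1 : cs' ≠ []) (h2 : cs'.head? ≠ some '\n') :
    PySem.Chars.splitOn (l ++ '\n' :: cs') ['\n', '\n'] =
      pvPrep (l ++ ['\n']) (PySem.Chars.splitOn cs' ['\n', '\n']) := by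
  induction l with
  | nil =>
    rw [List.nil_append, pvS2_other '\n' cs' (by intro h; exact h2 h.2)]
    rfl
  | cons c l' ih =>
    have hc : c ≠ '\n' := fun h => hl (by simp [h])
    rw [List.cons_append, pvS2_other c _ (by intro h; exact hc h.1)]
    rw [ih (fun h => hl (by simp [h]))]
    rw [pvPrep_prep]
    rfl

def pvCnt (g : List Char) : Int := PySem.Set.len (PySem.Set.ofList g)

def pvStepA (st : Int × List Char) (line : List Char) : Int × List Char :=
  if line = ([] : List Char) then (st.1 + PySem.Set.len (PySem.Set.ofList st.2), ([] : List Char))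
  else (st.1, st.2 ++ line)

def pvRunA (lines : List (List Char)) (st : Int × List Char) : Int :=
  let r := lines.foldl pvStepA st
  r.1 + PySem.Set.len (PySem.Set.ofList r.2)

def pvVal (c : List Char) : Int := pvCnt (c.filter (fun x => x ≠ '\n'))

def pvSumB (g : List Char) : List (List Char) → Int
  | [] => pvCnt g
  | c :: cr => pvCnt (g ++ c.filter (fun x => x ≠ '\n')) + (cr.map pvVal).sum

lemma pvRunA_cons (l : List Char) (ls : List (List Char)) (t : Int) (g : List Char) :
    pvRunA (l :: ls) (t, g) =
      if l = ([] : List Char) then pvRunA ls (t + pvCnt g, []) else pvRunA ls (t, g ++ l) := by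
  by_cases h : l = ([] : List Char) <;> simp [pvRunA, pvStepA, pvCnt, h]

lemma pvFilter_self (l : List Char) (hl : '\n' ∉ l) : l.filter (fun x => x ≠ '\n') = l := by
  apply List.filter_eq_self.mpr
  intro a ha
  simp only [decide_eq_true_eq]
  intro h; exact hl (h ▸ ha)

lemma pvCnt_nil : pvCnt [] = 0 := rfl

lemma pvPrep_ne_nil (x : List Char) (X : List (List Char)) : pvPrep x X ≠ [] := by
  cases X <;> simp [pvPrep]

lemma pvSplitOn2_ne_nil (cs : List Char) : PySem.Chars.splitOn cs ['\n', '\n'] ≠ [] := by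
  cases cs with
  | nil => simp [pvSplitOn_nil]
  | cons c r =>
    by_cases hp : (['\n', '\n'] : List Char).isPrefixOf (c :: r)
    · rw [pvSplitOn_pos _ (by simp) _ _ hp]; simp
    · rw [pvSplitOn_neg _ (by simp) _ _ hp]; exact pvPrep_ne_nil _ _

lemma pvSumB_nil_g (C : List (List Char)) (hC : C ≠ []) : pvSumB [] C = (C.map pvVal).sum := by
  cases C with
  | nil => exact absurd rfl hC
  | cons c cr => simp [pvSumB, pvVal]

lemma pvJoin_head (l2 : List Char) (h2 : l2 ≠ []) (hnl : '\n' ∉ l2) (rest2 : List (List Char)) :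
    PySem.Chars.join ['\n'] (l2 :: rest2) ≠ [] ∧
      (PySem.Chars.join ['\n'] (l2 :: rest2)).head? ≠ some '\n' := by
  rcases List.exists_cons_of_ne_nil h2 with ⟨c, l2', rfl⟩
  have hc : c ≠ '\n' := fun h => hnl (by simp [h])
  cases rest2 with
  | nil => rw [pvJoin_single]; exact ⟨by simp, by simp [hc]⟩
  | cons y t => rw [pvJoin_cons]; exact ⟨by simp, by simp [hc]⟩

lemma pvSumB_cons (g c : List Char) (cr : List (List Char)) :
    pvSumB g (c :: cr) = pvCnt (g ++ c.filter (fun x => x ≠ '\n')) + (cr.map pvVal).sum := rfl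

lemma pvJoin1_cons (x y : List Char) (t : List (List Char)) :
    PySem.Chars.join ['\n'] (x :: y :: t) = x ++ '\n' :: PySem.Chars.join ['\n'] (y :: t) := by
  rw [pvJoin_cons]; simp

lemma pvMainAux : ∀ (n : Nat) (lines : List (List Char)), lines.length ≤ n → lines ≠ [] →
    (∀ l ∈ lines, '\n' ∉ l) →
    ∀ (t : Int) (g : List Char), (lines.head? = some [] → g = []) →
    pvRunA lines (t, g) = t + pvSumB g (PySem.Chars.splitOn (PySem.Chars.join ['\n'] lines) ['\n', '\n']) := by
  intro n
  induction n with
  | zero => intro lines hlen hne; simp [List.length_eq_zero_iff.mp (Nat.le_zero.mp hlen)] at hne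
  | succ n ih =>
    intro lines hlen hne hfree t g hg
    rcases List.exists_cons_of_ne_nil hne with ⟨l, rest, rfl⟩
    have hlfree : '\n' ∉ l := hfree l (by simp)
    cases rest with
    | nil =>
      -- lines = [l]
      rw [pvJoin_single, pvC1 l hlfree, pvSumB_cons, pvFilter_self l hlfree]
      by_cases hl : l = ([] : List Char)
      · subst hl
        simp [pvRunA_cons, pvRunA, pvStepA, pvCnt]
      · rw [pvRunA_cons, if_neg hl]
        simp [pvRunA, pvStepA, pvCnt]
    | cons l2 rest2 =>
      by_cases h2 : l2 = ([] : List Char)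
      · subst h2
        cases rest2 with
        | nil =>
          -- lines = [l, []]
          rw [pvJoin1_cons, pvJoin_single, pvC3 l hlfree, pvSumB_cons, List.filter_append,
              pvFilter_self l hlfree]
          by_cases hl : l = ([] : List Char)
          · subst hl
            simp [pvRunA_cons, pvRunA, pvStepA, pvCnt]
          · rw [pvRunA_cons, if_neg hl, pvRunA_cons, if_pos rfl]
            simp [pvRunA, pvStepA, pvCnt]
        | cons l3 rest3 =>
          -- lines = l :: [] :: l3 :: rest3
          rw [pvJoin1_cons, pvJoin1_cons, List.nil_append, pvC2 l hlfree, pvSumB_cons,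
              pvFilter_self l hlfree]
          have hC' := pvSplitOn2_ne_nil (PySem.Chars.join ['\n'] (l3 :: rest3))
          have hrec := ih (l3 :: rest3) (by simp at hlen ⊢; omega)
              (by simp) (by intro x hx; exact hfree x (List.mem_cons_of_mem _ (List.mem_cons_of_mem _ hx)))
          rw [← pvSumB_nil_g _ hC']
          by_cases hl : l = ([] : List Char)
          · subst hl
            rw [pvRunA_cons, if_pos rfl, pvRunA_cons, if_pos rfl]
            rw [hrec (t + pvCnt g + pvCnt []) [] (fun _ => rfl)]
            simp [pvCnt]
            ring
          · rw [pvRunA_cons, if_neg hl, pvRunA_cons, if_pos rfl]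
            rw [hrec (t + pvCnt (g ++ l)) [] (fun _ => rfl)]
            ring
      · -- lines = l :: l2 :: rest2, l2 ≠ []
        have h2free : '\n' ∉ l2 := hfree l2 (by simp)
        obtain ⟨hcs1, hcs2⟩ := pvJoin_head l2 h2 h2free rest2
        rw [pvJoin1_cons, pvC4 l hlfree _ hcs1 hcs2]
        rcases List.exists_cons_of_ne_nil (pvSplitOn2_ne_nil (PySem.Chars.join ['\n'] (l2 :: rest2))) with ⟨c0, cr, hC⟩
        rw [hC]
        have hrec := ih (l2 :: rest2) (by simp at hlen ⊢; omega)
            (by simp) (by intro x hx; exact hfree x (List.mem_cons_of_mem _ hx))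
        by_cases hl : l = ([] : List Char)
        · have hg' : g = [] := hg (by simp [hl])
          subst hl; subst hg'
          rw [pvRunA_cons, if_pos rfl]
          rw [hrec (t + pvCnt []) [] (fun h => absurd (by simpa using h) h2), hC]
          simp only [pvPrep, pvSumB_cons, pvCnt_nil, List.nil_append, List.filter_append,
            List.filter_cons, List.append_nil]
          simp [pvCnt]
        · rw [pvRunA_cons, if_neg hl]
          rw [hrec t (g ++ l) (fun h => absurd (by simpa using h) h2), hC]
          simp only [pvPrep, pvSumB_cons, List.filter_append, List.filter_cons,
            pvFilter_self l hlfree]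
          simp [List.append_assoc]

lemma pvDiffLen (c : List Char) :
    PySem.Set.len (PySem.Set.diff (PySem.Set.ofList c) (PySem.Set.ofList ['\n'])) = pvVal c := by
  unfold pvVal pvCnt PySem.Set.len
  congr 1
  have h1 : (PySem.Set.diff (PySem.Set.ofList c) (PySem.Set.ofList ['\n'])).Nodup :=
    (PySem.Set.nodup_ofList c).filter _
  have h2 : (PySem.Set.ofList (c.filter (fun x => x ≠ '\n'))).Nodup :=
    PySem.Set.nodup_ofList _
  rw [← List.toFinset_card_of_nodup h1, ← List.toFinset_card_of_nodup h2]
  congr 1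
  ext x
  simp [PySem.Set.diff, List.mem_filter, PySem.Set.mem_ofList]

theorem pvFinal (answers : String) : parse_any_member answers = parse_any_member_alt answers := by
  have hmain := pvMainAux (PySem.Chars.splitOn answers.toList ['\n']).length
      (PySem.Chars.splitOn answers.toList ['\n']) le_rfl (pvS1_struct answers.toList).1
      (pvS1_struct answers.toList).2.1 0 [] (fun _ => rfl)
  rw [(pvS1_struct answers.toList).2.2] at hmain
  have hA : parse_any_member answers =
      pvRunA (PySem.Chars.splitOn answers.toList ['\n']) (0, []) := rfl
  rw [hA, hmain, zero_add]
  rw [pvSumB_nil_g _ (pvSplitOn2_ne_nil answers.toList)]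
  unfold parse_any_member_alt
  congr 1
  apply List.map_congr_left
  intro c _
  rw [pvDiffLen]

-- ===== VERDICT (by name: the statement is the Claim_ definition above) =====
theorem parse_any_member_spec : Claim_equal_parse_any_member := by
  intro answers _
  unfold Spec_parse_any_member
  exact pvFinal answers
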